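-- pv_equiv track=rewrite | github.com/stupidguy176/astromoney | astrology_app.py | get_dominant_planet
-- ===== SOURCE A (Python) =====
-- rulers = {
--     "Aries": "Mars",
--     "Taurus": "Venus",
--     "Gemini": "Mercury",
--     "Cancer": "Moon",
--     "Leo": "Sun",
--     "Virgo": "Mercury",
--     "Libra": "Venus",
--     "Scorpio": ["Mars", "Pluto"],
--     "Sagittarius": "Jupiter",
--     "Capricorn": "Saturn",
--     "Aquarius": ["Saturn", "Uranus"],
--     "Pisces": ["Jupiter", "Neptune"]
-- }
--
-- zodiac_positions = {
--     'Sun': 10,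
--     'Moon': 7,
--     'Mercury': 5,
--     'Mars': 8,
--     'Venus': 6,
--     'Jupiter': 9,
--     'Saturn': 7,
--     'Uranus': 4,
--     'Neptune': 3,
--     'Pluto': 2
-- }
--
-- def get_dominant_planet(planet1, planet2, individual_planets):
--     if planet1 not in zodiac_positions or planet2 not in zodiac_positions:
--         return None  # Bỏ qua nếu hành tinh không trong danh sách
--
--     planet1_power = zodiac_positions.get(planet1, 0)
--     planet2_power = zodiac_positions.get(planet2, 0)
--
--     try:
--         planet1_sign = [sign for planet, sign in individual_planets if planet == planet1][0]
--     except IndexError: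
--         planet1_sign = None
--
--     try:
--         planet2_sign = [sign for planet, sign in individual_planets if planet == planet2][0]
--     except IndexError:
--         planet2_sign = None
--
--     if planet1_sign and (planet1 in rulers.get(planet1_sign, []) if isinstance(rulers.get(planet1_sign), list) else planet1 == rulers.get(planet1_sign)):
--         return planet1
--
--     if planet2_sign and (planet2 in rulers.get(planet2_sign, []) if isinstance(rulers.get(planet2_sign), list) else planet2 == rulers.get(planet2_sign)):
--         return planet2
--
--     if planet1_power > planet2_power:
--         dominant_planet = planet1
--     elif planet2_power > planet1_power:
--         dominant_planet = planet2
--     else: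
--         dominant_planet = planet1
--
--     return dominant_planet
-- ===== SOURCE B (Python) =====
-- rulers = {
--     "Aries": "Mars",
--     "Taurus": "Venus",
--     "Gemini": "Mercury",
--     "Cancer": "Moon",
--     "Leo": "Sun",
--     "Virgo": "Mercury",
--     "Libra": "Venus",
--     "Scorpio": ["Mars", "Pluto"],
--     "Sagittarius": "Jupiter",
--     "Capricorn": "Saturn",
--     "Aquarius": ["Saturn", "Uranus"],
--     "Pisces": ["Jupiter", "Neptune"]
-- }
--
-- zodiac_positions = {
--     'Sun': 10,
--     'Moon': 7,
--     'Mercury': 5,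
--     'Mars': 8,
--     'Venus': 6,
--     'Jupiter': 9,
--     'Saturn': 7,
--     'Uranus': 4,
--     'Neptune': 3,
--     'Pluto': 2
-- }
--
--
-- def _score(planet, individual_planets):
--     """Dominance score: a planet ruling its own sign beats any zodiac power (max 10)."""
--     sign = next((s for p, s in individual_planets if p == planet), None)
--     rs = rulers.get(sign, [])
--     if not isinstance(rs, list):
--         rs = [rs]
--     return 100 if planet in rs else zodiac_positions[planet]
--
--
-- def get_dominant_planet(planet1, planet2, individual_planets):
--     if planet1 not in zodiac_positions or planet2 not in zodiac_positions:
--         return None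
--     # select by maximal score; max keeps the first argument on ties, as A does
--     return max((planet1, planet2), key=lambda p: _score(p, individual_planets))
-- ===== Notes on version B (the rewrite author's own statement) =====
-- stated objective: alternative
-- what changed: Replaces A's four-branch decision chain (two try/except filter scans, two separate inline isinstance rulership tests, then a three-way power comparison) by a single numeric dominance score per planet (100 if the planet rules its first-listed sign, else its zodiac power, which is at most 10) and one max() selection over the pair with ties going to the first argument, using a short-circuiting next() scan instead of filtering the whole list.
import Mathlib
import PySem

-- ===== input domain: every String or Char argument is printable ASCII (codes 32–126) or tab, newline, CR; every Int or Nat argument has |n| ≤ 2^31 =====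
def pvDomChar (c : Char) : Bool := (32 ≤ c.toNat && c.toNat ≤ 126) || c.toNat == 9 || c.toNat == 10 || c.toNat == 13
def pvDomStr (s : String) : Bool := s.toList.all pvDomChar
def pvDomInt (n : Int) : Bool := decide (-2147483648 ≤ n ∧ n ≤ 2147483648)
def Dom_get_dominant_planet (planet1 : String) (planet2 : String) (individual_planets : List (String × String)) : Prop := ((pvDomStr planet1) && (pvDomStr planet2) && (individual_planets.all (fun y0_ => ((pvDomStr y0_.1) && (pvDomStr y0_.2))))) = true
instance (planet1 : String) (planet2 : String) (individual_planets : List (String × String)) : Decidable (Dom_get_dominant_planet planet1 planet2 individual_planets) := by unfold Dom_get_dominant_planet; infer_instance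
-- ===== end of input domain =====

-- B replaces A's four-branch decision chain (two filter scans with try/except, two inline
-- isinstance rulership tests, three-way power comparison) by one numeric dominance score
-- per planet (100 if ruler of its first-listed sign, else its power) and a max() over the pair.

-- a rulers value is either a single planet name or a list of them (Python str vs list)
inductive RulerVal where
  | one : String → RulerVal
  | many : List String → RulerVal
deriving DecidableEq, Repr

def rulersD : PySem.Dict String RulerVal := PySem.Dict.ofList
  [ ("Aries", .one "Mars"), ("Taurus", .one "Venus"), ("Gemini", .one "Mercury"),
    ("Cancer", .one "Moon"), ("Leo", .one "Sun"), ("Virgo", .one "Mercury"),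
    ("Libra", .one "Venus"), ("Scorpio", .many ["Mars", "Pluto"]),
    ("Sagittarius", .one "Jupiter"), ("Capricorn", .one "Saturn"),
    ("Aquarius", .many ["Saturn", "Uranus"]), ("Pisces", .many ["Jupiter", "Neptune"]) ]

def zodiacD : PySem.Dict String Int := PySem.Dict.ofList
  [ ("Sun", 10), ("Moon", 7), ("Mercury", 5), ("Mars", 8), ("Venus", 6),
    ("Jupiter", 9), ("Saturn", 7), ("Uranus", 4), ("Neptune", 3), ("Pluto", 2) ]

-- ===== PORT A =====
-- A's inline expression 'planet in rulers.get(sign, []) if isinstance(rulers.get(sign), list)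
-- else planet == rulers.get(sign)'; get returning None compares False against a string.
def rulerCheckA (p : String) (sign : String) : Bool :=
  match PySem.Dict.get? rulersD sign with
  | some (.many vs) => vs.contains p
  | some (.one v)   => p == v
  | none            => false

def get_dominant_planet (planet1 : String) (planet2 : String) (individual_planets : List (String × String)) : Option String :=
  if !PySem.Dict.contains zodiacD planet1 || !PySem.Dict.contains zodiacD planet2 then none
  else
    let planet1_power := PySem.Dict.getD zodiacD planet1 0
    let planet2_power := PySem.Dict.getD zodiacD planet2 0
    -- '[sign for planet, sign in ips if planet == planetX][0]' with IndexError -> None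
    let planet1_sign : Option String := ((individual_planets.filter (fun ps => ps.1 == planet1)).map Prod.snd).head?
    let planet2_sign : Option String := ((individual_planets.filter (fun ps => ps.1 == planet2)).map Prod.snd).head?
    -- 'planet1_sign and (...)': truthiness of an Option String (None and "" are falsy)
    if (match planet1_sign with | some s => (s != "") && rulerCheckA planet1 s | none => false) then some planet1
    else if (match planet2_sign with | some s => (s != "") && rulerCheckA planet2 s | none => false) then some planet2
    else if planet1_power > planet2_power then some planet1
    else if planet2_power > planet1_power then some planet2
    else some planet1

-- ===== PORT B =====
-- 'next((s for p, s in ips if p == planet), None)': first-match scan, short-circuiting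
def firstSign (planet : String) (ips : List (String × String)) : Option String :=
  match ips with
  | [] => none
  | (p, s) :: rest => if p == planet then some s else firstSign planet rest

-- 'rs = rulers.get(sign, []); if not isinstance(rs, list): rs = [rs]': the rulers of a
-- (possibly missing) sign, normalized to a list
def rulersOf (sign : Option String) : List String :=
  match sign with
  | none => []                    -- rulers.get(None, []) = []
  | some s =>
    match PySem.Dict.get? rulersD s with
    | none            => []
    | some (.one v)   => [v]      -- not a list: wrapped into one
    | some (.many vs) => vs

-- _score: '100 if planet in rs else zodiac_positions[planet]'
-- (zodiac_positions[planet] never misses: the caller's guard checked membership, so getD is exact)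
def scoreB (planet : String) (individual_planets : List (String × String)) : Int :=
  if (rulersOf (firstSign planet individual_planets)).contains planet then 100
  else PySem.Dict.getD zodiacD planet 0

def get_dominant_planet_alt (planet1 : String) (planet2 : String) (individual_planets : List (String × String)) : Option String :=
  if !PySem.Dict.contains zodiacD planet1 || !PySem.Dict.contains zodiacD planet2 then none
  else
    -- max((planet1, planet2), key=score): keeps the first element unless a later one is strictly greater
    some (if scoreB planet2 individual_planets > scoreB planet1 individual_planets then planet2 else planet1)

-- ===== PRECONDITION & SPEC =====
def Spec_get_dominant_planet (planet1 : String) (planet2 : String) (individual_planets : List (String × String)) (out : Option String) : Prop := out = get_dominant_planet_alt planet1 planet2 individual_planets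
instance (planet1 : String) (planet2 : String) (individual_planets : List (String × String)) (out : Option String) : Decidable (Spec_get_dominant_planet planet1 planet2 individual_planets out) := by unfold Spec_get_dominant_planet; infer_instance

-- ===== CLAIM (what is proved, stated in full; the proofs are below) =====
def Claim_equal_get_dominant_planet : Prop := ∀ (planet1 : String) (planet2 : String) (individual_planets : List (String × String)), Dom_get_dominant_planet planet1 planet2 individual_planets → Spec_get_dominant_planet planet1 planet2 individual_planets (get_dominant_planet planet1 planet2 individual_planets)

-- ===== LEMMAS AND PROOFS =====

-- B's short-circuit first-match scan finds the same sign as A's filter-then-head.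
theorem firstSign_eq_filter_head (planet : String) (ips : List (String × String)) :
    firstSign planet ips = ((ips.filter (fun ps => ps.1 == planet)).map Prod.snd).head? := by
  induction ips with
  | nil => rfl
  | cons kv rest ih =>
    obtain ⟨p, s⟩ := kv
    by_cases h : (p == planet) = true
    · simp [firstSign, h]
    · simp only [Bool.not_eq_true] at h
      simp [firstSign, h, ih]

theorem rulersD_key_ne_empty (s : String) (rv : RulerVal)
    (h : PySem.Dict.get? rulersD s = some rv) : (s != "") = true := by
  by_cases hs : s = ""
  · subst hs
    have : PySem.Dict.get? rulersD "" = none := by decide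
    rw [this] at h; exact absurd h (by simp)
  · simpa using hs

-- A's truthiness-guarded inline rulership test fires exactly when B's score is the ruler score.
theorem ruler_cond_eq_score (p : String) (ips : List (String × String)) :
    (match ((ips.filter (fun ps => ps.1 == p)).map Prod.snd).head? with
      | some s => (s != "") && rulerCheckA p s | none => false)
      = (rulersOf (firstSign p ips)).contains p := by
  rw [firstSign_eq_filter_head]
  cases ((ips.filter (fun ps => ps.1 == p)).map Prod.snd).head? with
  | none => simp [rulersOf]
  | some s =>
    cases h : PySem.Dict.get? rulersD s with
    | none => simp [rulerCheckA, rulersOf, h]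
    | some rv =>
      have hne := rulersD_key_ne_empty s rv h
      cases rv with
      | one v =>
        simp only [rulerCheckA, rulersOf, h, hne, Bool.true_and, List.contains_eq_mem,
          List.mem_singleton]
        by_cases hpv : p = v <;> simp [hpv]
      | many vs => simp [rulerCheckA, rulersOf, h, hne]

-- every zodiac power in the table lies below the ruler score 100 (default 0 included)
theorem zodiacD_getD_le (p : String) : PySem.Dict.getD zodiacD p 0 <= 10 := by
  simp only [PySem.Dict.getD, PySem.Dict.get?]
  cases hq : zodiacD.items.find? (fun q => q.1 == p) with
  | none => simp
  | some pr =>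
    have hm : pr ∈ zodiacD.items := List.mem_of_find?_eq_some hq
    have hz : zodiacD.items = [("Sun", (10 : Int)), ("Moon", 7), ("Mercury", 5), ("Mars", 8),
        ("Venus", 6), ("Jupiter", 9), ("Saturn", 7), ("Uranus", 4), ("Neptune", 3), ("Pluto", 2)] := by
      decide
    rw [hz] at hm
    simp only [List.mem_cons, List.not_mem_nil, or_false] at hm
    rcases hm with h | h | h | h | h | h | h | h | h | h <;> subst h <;> simp

-- ===== VERDICT (by name: the statement is the Claim_ definition above) =====
theorem get_dominant_planet_spec : Claim_equal_get_dominant_planet := by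
  intro planet1 planet2 individual_planets _
  unfold Spec_get_dominant_planet get_dominant_planet get_dominant_planet_alt
  by_cases hg : (!PySem.Dict.contains zodiacD planet1 || !PySem.Dict.contains zodiacD planet2) = true
  · simp [hg]
  · have hgf : (!PySem.Dict.contains zodiacD planet1 || !PySem.Dict.contains zodiacD planet2) = false := by
      simpa using hg
    simp only [hgf, Bool.false_eq_true, if_false]
    unfold scoreB
    rw [ruler_cond_eq_score planet1 individual_planets,
        ruler_cond_eq_score planet2 individual_planets]
    have hb1 := zodiacD_getD_le planet1
    have hb2 := zodiacD_getD_le planet2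
    cases h1 : (rulersOf (firstSign planet1 individual_planets)).contains planet1 <;>
      cases h2 : (rulersOf (firstSign planet2 individual_planets)).contains planet2 <;>
      simp only [if_true, if_false, Bool.false_eq_true] <;>
      split_ifs <;> first | rfl | omega
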